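-- pv_equiv track=rewrite | github.com/Reno50/Reno50-s-Advent-of-Code-2023 | Day9Challenge.py | recursiveDerivative
-- ===== SOURCE A (Python) =====
-- def recursiveDerivative(array: list) -> list:
--     ''' returns an array of the differences between the elements in a given array
--         assumes the given array is an array of arrays
--         goes all the way until it is entirely 0 or it is length 1
--     >>> recursiveDerivative([[2, 2, 2]])
--     [[2, 2, 2], [0, 0]]
--     >>> recursiveDerivative([[0, 3, 6, 9, 12, 15]])
--     [[0, 3, 6, 9, 12, 15], [3, 3, 3, 3, 3], [0, 0, 0, 0]]
--     '''
--     result = []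
--     for i in range(len(array[-1]) - 1):
--         result.append(array[-1][i + 1] - array[-1][i])
--     returnVal = array[:]
--     returnVal.append(result)
--     for val in returnVal[-1]:
--         if val != 0:
--             returnVal = recursiveDerivative(returnVal)
--             break
--     return returnVal
-- ===== SOURCE B (Python) =====
-- def recursiveDerivative(array: list) -> list:
--     rows = array[:]
--     while True:
--         last = rows[-1]
--         diff = [b - a for a, b in zip(last, last[1:])]
--         rows.append(diff)
--         if all(v == 0 for v in diff):
--             return rows
-- ===== Notes on version B (the rewrite author's own statement) =====
-- stated objective: simpler
-- what changed: Replaces the recursion that re-copies the whole row list at every level with a single iterative loop that grows one list, computing each difference row with zip over adjacent pairs instead of index arithmetic over range(len-1).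
import Mathlib
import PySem

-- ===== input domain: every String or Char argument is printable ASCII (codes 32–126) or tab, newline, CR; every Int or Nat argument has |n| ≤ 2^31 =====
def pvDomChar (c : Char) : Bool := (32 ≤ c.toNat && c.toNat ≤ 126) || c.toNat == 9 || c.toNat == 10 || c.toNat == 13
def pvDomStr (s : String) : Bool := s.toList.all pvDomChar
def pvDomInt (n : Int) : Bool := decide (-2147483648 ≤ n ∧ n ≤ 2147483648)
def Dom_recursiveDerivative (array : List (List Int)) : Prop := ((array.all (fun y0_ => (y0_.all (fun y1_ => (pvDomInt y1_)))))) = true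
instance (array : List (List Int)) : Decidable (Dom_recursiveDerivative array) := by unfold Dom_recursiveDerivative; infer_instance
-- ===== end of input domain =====

-- B replaces A's recursion (which re-copies the whole row list at every level) by one
-- iterative loop growing a single list, with the difference row built by zipping adjacent pairs.

-- ===== PORT A =====
-- A: result = [last[i+1] - last[i] for i in range(len(last)-1)]; returnVal = array + [result];
--    recurse iff some val in result is nonzero.  array[-1] read via getLast?.getD [] (in range on Pre_).
def recursiveDerivative (array : List (List Int)) : List (List Int) :=
  let last := array.getLast?.getD []
  let result := (List.range (last.length - 1)).map (fun i => last.getD (i + 1) 0 - last.getD i 0)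
  let returnVal := array ++ [result]
  if result.any (fun v => v != 0) then recursiveDerivative returnVal else returnVal
termination_by (array.getLast?.getD []).length
decreasing_by
  rename_i h
  have hne : result ≠ [] := by intro he; rw [he] at h; simp at h
  have h1 : result.length = last.length - 1 := by simp [result]
  have h2 : (returnVal.getLast?.getD []) = result := by simp [returnVal, List.getLast?_append]
  have h3 : last = array.getLast?.getD [] := rfl
  rw [h2, h1, ← h3]
  have : result.length ≠ 0 := by simpa [List.length_eq_zero_iff] using hne
  omega

-- ===== PORT B =====
-- B: rows = array[:]; loop: last row, diff = [b - a for a, b in zip(last, last[1:])],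
--    append diff, return rows when all of diff are 0.  The loop carries the last row as `cur`.
def altLoop (rows : List (List Int)) (cur : List Int) : List (List Int) :=
  let diff := List.zipWith (fun a b => b - a) cur cur.tail
  let rows' := rows ++ [diff]
  if diff.all (fun v => v == 0) then rows' else altLoop rows' diff
termination_by cur.length
decreasing_by
  rename_i h
  have hne : diff ≠ [] := by intro he; rw [he] at h; simp at h
  have h1 : diff.length = min cur.length (cur.length - 1) := by
    simp [diff, List.length_tail]
  have : diff.length ≠ 0 := by simpa [List.length_eq_zero_iff] using hne
  rw [h1]
  omega

def recursiveDerivative_alt (array : List (List Int)) : List (List Int) :=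
  altLoop array (array.getLast?.getD [])

-- ===== PRECONDITION & SPEC =====
-- Pre_ excludes only the empty outer list, on which Python A raises IndexError at array[-1].
def Pre_recursiveDerivative (array : List (List Int)) : Prop := array ≠ []
instance (array : List (List Int)) : Decidable (Pre_recursiveDerivative array) := by
  unfold Pre_recursiveDerivative; infer_instance
def pvWitness_recursiveDerivative : List (List Int) := [[0, 3, 6, 9, 12, 15]]
def Spec_recursiveDerivative (array : List (List Int)) (out : List (List Int)) : Prop := out = recursiveDerivative_alt array
instance (array : List (List Int)) (out : List (List Int)) : Decidable (Spec_recursiveDerivative array out) := by unfold Spec_recursiveDerivative; infer_instance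

-- ===== CLAIM (what is proved, stated in full; the proofs are below) =====
def Claim_equal_recursiveDerivative : Prop := ∀ (array : List (List Int)), Dom_recursiveDerivative array → Pre_recursiveDerivative array → Spec_recursiveDerivative array (recursiveDerivative array)

-- ===== LEMMAS AND PROOFS =====

-- The two difference-row computations agree: index form (A) = zip of adjacent pairs (B).
theorem diff_eq (r : List Int) :
    (List.range (r.length - 1)).map (fun i => r.getD (i + 1) 0 - r.getD i 0)
      = List.zipWith (fun a b => b - a) r r.tail := by
  apply List.ext_getElem
  · simp [List.length_tail]
  · intro i h1 h2
    have hlen : i < r.length - 1 := by simpa using h1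
    have hi : i < r.length := by omega
    have hi1 : i + 1 < r.length := by omega
    simp [List.getElem_zipWith, List.getElem_tail, List.getD_eq_getElem?_getD,
      List.getElem?_eq_getElem hi, List.getElem?_eq_getElem hi1]

theorem any_ne_eq_not_all_eq (l : List Int) :
    (l.any fun v => v != 0) = !(l.all fun v => v == 0) := by
  induction l with
  | nil => rfl
  | cons a t iht =>
    have iht' : (t.any fun v => !(v == 0)) = !t.all (fun v => v == 0) := by
      simpa [bne] using iht
    simp [List.any_cons, List.all_cons, bne, Bool.not_and, iht']

theorem main_eq (array : List (List Int)) :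
    recursiveDerivative array = altLoop array (array.getLast?.getD []) := by
  generalize hn : (array.getLast?.getD []).length = n
  induction n using Nat.strong_induction_on generalizing array with
  | _ n ih =>
    rw [recursiveDerivative.eq_def, altLoop.eq_def]
    simp only [diff_eq, any_ne_eq_not_all_eq]
    set diff := List.zipWith (fun a b : Int => b - a) (array.getLast?.getD [])
      (array.getLast?.getD []).tail with hd
    by_cases hall : (diff.all fun v => v == 0) = true
    · simp [hall]
    · have hall' : (diff.all fun v => v == 0) = false := by
        simpa using hall
      simp only [hall', Bool.not_false, if_true, Bool.false_eq_true, if_false]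
      have hlast : ((array ++ [diff]).getLast?.getD []) = diff := by
        simp [List.getLast?_append]
      have hne : diff ≠ [] := by
        intro he; rw [he] at hall'; simp at hall'
      have hcur : (array.getLast?.getD []) ≠ [] := by
        intro he
        apply hne
        rw [hd, he]; rfl
      have hdl : diff.length < n := by
        rw [← hn, hd]
        have h0 : (array.getLast?.getD []).length ≠ 0 := by
          simpa [List.length_eq_zero_iff] using hcur
        simp [List.length_zipWith, List.length_tail]
        omega
      have := ih diff.length hdl (array ++ [diff]) (by rw [hlast])
      rw [this, hlast]

-- ===== VERDICT (by name: the statement is the Claim_ definition above) =====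
theorem recursiveDerivative_spec : Claim_equal_recursiveDerivative := by
  intro array _ _
  unfold Spec_recursiveDerivative recursiveDerivative_alt
  exact main_eq array
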